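-- pv_equiv track=rewrite | github.com/Mouadistaa/project-pulse-ai | backend/app/modules/integrations/trello/mapper.py | derive_metrics_from_cards
-- ===== SOURCE A (Python) =====
-- from typing import Dict, Any, List, Optional
--
-- def derive_metrics_from_cards(cards: List[Dict[str, Any]]) -> Dict[str, Any]:
--     """
--     Derive basic metrics from a list of work items.
--
--     Returns:
--         Dict with wip, throughput_potential, bug_count, etc.
--     """
--     wip = 0
--     done = 0
--     bugs = 0
--
--     for card in cards:
--         raw = card.get("raw_data", {})
--         status = raw.get("status", "").lower()
--
--         if status in ["in progress", "doing", "in review", "review"]: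
--             wip += 1
--         elif status in ["done", "complete", "closed", "resolved", "deployed"]:
--             done += 1
--
--         if raw.get("cardtype", "").lower() == "bug":
--             bugs += 1
--
--     return {
--         "wip": wip,
--         "done_count": done,
--         "bug_count": bugs,
--         "total_cards": len(cards)
--     }
-- ===== SOURCE B (Python) =====
-- WIP_STATUSES = ("in progress", "doing", "in review", "review")
-- DONE_STATUSES = ("done", "complete", "closed", "resolved", "deployed")
--
--
-- def derive_metrics_from_cards(cards):
--     """Tabulate a frequency table of lowered statuses (plus a bug tally) in one
--     pass, then derive wip/done by reducing the table over the status sets."""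
--     status_freq = {}
--     bug_count = 0
--     for card in cards:
--         raw = card.get("raw_data", {})
--         s = raw.get("status", "").lower()
--         status_freq[s] = status_freq.get(s, 0) + 1
--         if raw.get("cardtype", "").lower() == "bug":
--             bug_count += 1
--     return {
--         "wip": sum(status_freq.get(s, 0) for s in WIP_STATUSES),
--         "done_count": sum(status_freq.get(s, 0) for s in DONE_STATUSES),
--         "bug_count": bug_count,
--         "total_cards": len(cards),
--     }
-- ===== Notes on version B (the rewrite author's own statement) =====
-- stated objective: alternative
-- what changed: Replaces the per-card if/elif accumulation of wip/done with a tabulate-then-reduce shape: one pass builds a frequency table of lowered statuses (plus the bug tally), then wip and done are obtained by summing the table over the WIP and DONE status sets.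
import Mathlib
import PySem

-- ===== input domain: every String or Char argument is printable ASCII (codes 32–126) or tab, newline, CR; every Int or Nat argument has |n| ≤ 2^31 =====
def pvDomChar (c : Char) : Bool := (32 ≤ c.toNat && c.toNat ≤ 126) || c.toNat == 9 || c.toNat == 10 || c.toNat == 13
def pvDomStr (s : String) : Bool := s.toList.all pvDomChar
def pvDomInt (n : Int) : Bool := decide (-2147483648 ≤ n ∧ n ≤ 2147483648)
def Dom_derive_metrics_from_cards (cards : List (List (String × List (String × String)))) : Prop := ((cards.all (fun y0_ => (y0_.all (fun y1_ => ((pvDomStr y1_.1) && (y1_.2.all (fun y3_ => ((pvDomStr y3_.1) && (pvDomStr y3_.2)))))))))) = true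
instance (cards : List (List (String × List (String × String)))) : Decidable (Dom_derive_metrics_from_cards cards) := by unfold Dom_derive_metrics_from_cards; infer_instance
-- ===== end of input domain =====

-- B differs from A only in decomposition: A's per-card if/elif tallies become a frequency table reduced over the status sets.

-- ===== PORT A =====
def derive_metrics_from_cards (cards : List (List (String × List (String × String)))) : List (String × Int) :=
  let s := cards.foldl (fun (acc : Int × Int × Int) card =>
    let raw : List (String × String) := (PySem.Dict.mk card).getD "raw_data" []
    let status := PySem.Str.lower ((PySem.Dict.mk raw).getD "status" "")
    let wd : Int × Int :=
      if status ∈ ["in progress", "doing", "in review", "review"] then (acc.1 + 1, acc.2.1)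
      else if status ∈ ["done", "complete", "closed", "resolved", "deployed"] then (acc.1, acc.2.1 + 1)
      else (acc.1, acc.2.1)
    let bugs : Int :=
      if PySem.Str.lower ((PySem.Dict.mk raw).getD "cardtype" "") = "bug" then acc.2.2 + 1 else acc.2.2
    (wd.1, wd.2, bugs)) (0, 0, 0)
  [("wip", s.1), ("done_count", s.2.1), ("bug_count", s.2.2), ("total_cards", (cards.length : Int))]

-- ===== PORT B =====
def pvWipStatuses : List String := ["in progress", "doing", "in review", "review"]
def pvDoneStatuses : List String := ["done", "complete", "closed", "resolved", "deployed"]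

def derive_metrics_from_cards_alt (cards : List (List (String × List (String × String)))) : List (String × Int) :=
  let fb := cards.foldl (fun (acc : PySem.Dict String Int × Int) card =>
    let raw : List (String × String) := (PySem.Dict.mk card).getD "raw_data" []
    let s := PySem.Str.lower ((PySem.Dict.mk raw).getD "status" "")
    let freq := acc.1.insert s (acc.1.getD s 0 + 1)
    let bugs : Int :=
      if PySem.Str.lower ((PySem.Dict.mk raw).getD "cardtype" "") = "bug" then acc.2 + 1 else acc.2
    (freq, bugs)) (PySem.Dict.empty, 0)
  [("wip", (pvWipStatuses.map (fun s => fb.1.getD s 0)).sum),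
   ("done_count", (pvDoneStatuses.map (fun s => fb.1.getD s 0)).sum),
   ("bug_count", fb.2), ("total_cards", (cards.length : Int))]

-- ===== PRECONDITION & SPEC =====
def Spec_derive_metrics_from_cards (cards : List (List (String × List (String × String)))) (out : List (String × Int)) : Prop := out = derive_metrics_from_cards_alt cards
instance (cards : List (List (String × List (String × String)))) (out : List (String × Int)) : Decidable (Spec_derive_metrics_from_cards cards out) := by unfold Spec_derive_metrics_from_cards; infer_instance

-- ===== CLAIM (what is proved, stated in full; the proofs are below) =====
def Claim_equal_derive_metrics_from_cards : Prop := ∀ (cards : List (List (String × List (String × String)))), Dom_derive_metrics_from_cards cards → Spec_derive_metrics_from_cards cards (derive_metrics_from_cards cards)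

-- ===== LEMMAS AND PROOFS =====

-- shared field extractors (exactly the expressions both ports compute per card)
def pvRaw (card : List (String × List (String × String))) : List (String × String) :=
  (PySem.Dict.mk card).getD "raw_data" []
def pvStatus (card : List (String × List (String × String))) : String :=
  PySem.Str.lower ((PySem.Dict.mk (pvRaw card)).getD "status" "")
def pvIsBug (card : List (String × List (String × String))) : Bool :=
  PySem.Str.lower ((PySem.Dict.mk (pvRaw card)).getD "cardtype" "") = "bug"

def pvW (s : String) : Bool := decide (s ∈ pvWipStatuses)
def pvD (s : String) : Bool := !decide (s ∈ pvWipStatuses) && decide (s ∈ pvDoneStatuses)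

-- A's loop computes the three countP's, from any accumulator
lemma foldA_char (cards : List (List (String × List (String × String)))) :
    ∀ w d b : Int,
    cards.foldl (fun (acc : Int × Int × Int) card =>
      let raw : List (String × String) := (PySem.Dict.mk card).getD "raw_data" []
      let status := PySem.Str.lower ((PySem.Dict.mk raw).getD "status" "")
      let wd : Int × Int :=
        if status ∈ ["in progress", "doing", "in review", "review"] then (acc.1 + 1, acc.2.1)
        else if status ∈ ["done", "complete", "closed", "resolved", "deployed"] then (acc.1, acc.2.1 + 1)
        else (acc.1, acc.2.1)
      let bugs : Int :=
        if PySem.Str.lower ((PySem.Dict.mk raw).getD "cardtype" "") = "bug" then acc.2.2 + 1 else acc.2.2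
      (wd.1, wd.2, bugs)) (w, d, b)
    = (w + ((cards.map pvStatus).countP pvW : Int),
       d + ((cards.map pvStatus).countP pvD : Int),
       b + (cards.countP pvIsBug : Int)) := by
  induction cards with
  | nil => simp
  | cons c cs ih =>
    intro w d b
    by_cases h1 : pvStatus c ∈ pvWipStatuses
    · by_cases hb : pvIsBug c <;>
        simp_all [pvW, pvD, pvStatus, pvRaw, pvIsBug,
          pvWipStatuses, pvDoneStatuses] <;> omega
    · by_cases h2 : pvStatus c ∈ pvDoneStatuses <;> by_cases hb : pvIsBug c <;>
        simp_all [pvW, pvD, pvStatus, pvRaw, pvIsBug,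
          pvWipStatuses, pvDoneStatuses] <;> omega

-- B's loop, split into the frequency table (as a fold over the mapped statuses) and the bug tally
lemma foldB_char (cards : List (List (String × List (String × String)))) :
    ∀ (d0 : PySem.Dict String Int) (b : Int),
    cards.foldl (fun (acc : PySem.Dict String Int × Int) card =>
      let raw : List (String × String) := (PySem.Dict.mk card).getD "raw_data" []
      let s := PySem.Str.lower ((PySem.Dict.mk raw).getD "status" "")
      let freq := acc.1.insert s (acc.1.getD s 0 + 1)
      let bugs : Int :=
        if PySem.Str.lower ((PySem.Dict.mk raw).getD "cardtype" "") = "bug" then acc.2 + 1 else acc.2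
      (freq, bugs)) (d0, b)
    = ((cards.map pvStatus).foldl (fun d s => d.insert s (d.getD s 0 + 1)) d0,
       b + (cards.countP pvIsBug : Int)) := by
  induction cards with
  | nil => simp
  | cons c cs ih =>
    intro d0 b
    by_cases hb : pvIsBug c <;>
      simp_all [pvStatus, pvRaw, pvIsBug]; omega

-- summing the counts of the members of a Nodup key list equals one countP
lemma sum_count_eq_countP (K : List String) (hK : K.Nodup) :
    ∀ l : List String,
    (K.map (fun s => ((l.count s : Nat) : Int))).sum = ((l.countP (fun s => decide (s ∈ K)) : Nat) : Int) := by
  intro l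
  induction l with
  | nil => simp
  | cons x l ih =>
    have hus : ∀ (J : List String), J.Nodup →
        (J.map (fun s => if x = s then (1 : Int) else 0)).sum = if x ∈ J then (1 : Int) else 0 := by
      intro J hJ
      induction J with
      | nil => simp
      | cons k J ihJ =>
        rcases List.nodup_cons.mp hJ with ⟨hk, hJ'⟩
        by_cases hxk : x = k
        · subst hxk
          have h0 : (J.map (fun s => if x = s then (1 : Int) else 0)).sum = 0 := by
            rw [ihJ hJ']; simp [hk]
          simp [h0]
        · simp [List.map_cons, ihJ hJ', hxk]
    have hcnt : (K.map (fun s => (((x :: l).count s : Nat) : Int))).sum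
        = (K.map (fun s => ((l.count s : Nat) : Int))).sum
          + (K.map (fun s => if x = s then (1 : Int) else 0)).sum := by
      rw [← PySem.List.sum_map_add_int]
      apply congrArg
      apply List.map_congr_left
      intro s _
      by_cases hxs : x = s
      · subst hxs; simp
      · simp [hxs]
    rw [hcnt, ih, hus K hK, List.countP_cons]
    by_cases hx : x ∈ K <;> simp [hx]

-- A's elif-done predicate coincides with plain DONE membership (the two status sets are disjoint)
lemma pvD_eq (s : String) : pvD s = decide (s ∈ pvDoneStatuses) := by
  by_cases hd : s ∈ pvDoneStatuses
  · have hw : s ∉ pvWipStatuses := by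
      simp only [pvDoneStatuses, List.mem_cons, List.not_mem_nil, or_false] at hd
      rcases hd with rfl | rfl | rfl | rfl | rfl <;> decide
    simp [pvD, hd, hw]
  · simp [pvD, hd]

-- ===== VERDICT (by name: the statement is the Claim_ definition above) =====
theorem derive_metrics_from_cards_spec : Claim_equal_derive_metrics_from_cards := by
  intro cards _
  unfold Spec_derive_metrics_from_cards derive_metrics_from_cards derive_metrics_from_cards_alt
  rw [foldA_char, foldB_char]
  have hfreq : ∀ s : String,
      (((cards.map pvStatus).foldl (fun d s => d.insert s (d.getD s 0 + 1)) PySem.Dict.empty).getD s 0)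
        = ((cards.map pvStatus).count s : Int) := by
    intro s
    rw [PySem.Dict.getD_foldl_insert_add_one]
    simp
  have hwip : (pvWipStatuses.map (fun s =>
      ((cards.map pvStatus).foldl (fun d s => d.insert s (d.getD s 0 + 1)) PySem.Dict.empty).getD s 0)).sum
        = (((cards.map pvStatus).countP pvW : Nat) : Int) := by
    simp only [hfreq]
    rw [sum_count_eq_countP pvWipStatuses (by decide) (cards.map pvStatus)]
    rfl
  have hdone : (pvDoneStatuses.map (fun s =>
      ((cards.map pvStatus).foldl (fun d s => d.insert s (d.getD s 0 + 1)) PySem.Dict.empty).getD s 0)).sum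
        = (((cards.map pvStatus).countP pvD : Nat) : Int) := by
    simp only [hfreq]
    rw [sum_count_eq_countP pvDoneStatuses (by decide) (cards.map pvStatus)]
    rw [show (fun s => decide (s ∈ pvDoneStatuses)) = pvD from (funext pvD_eq).symm]
  simp [hwip, hdone]
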